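-- pv_equiv track=rewrite | github.com/abdolreza-mosaddegh/Descriptive-ML-on-Salmonella-MDR | Codes/PythonCode/agnes.py | __get_att_stat
-- ===== SOURCE A (Python) =====
-- def __get_att_stat(label_att):
--     att_analysis = {}
--     for item in label_att:
--         for att in item:
--             val = str(item[att])
--             if  att in att_analysis:
--                 if val in att_analysis[att]:
--                         att_analysis[att][val] += 1
--                 else:
--                     att_analysis[att][val] = 1
--             else:
--                 att_analysis[att] = {val: 1}
--     return att_analysis
-- ===== SOURCE B (Python) =====
-- def __get_att_stat(label_att):
--     # Stage 1: one flat frequency table keyed by the (attribute, value) pair.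
--     pairs = [(att, str(item[att])) for item in label_att for att in item]
--     counts = {}
--     for key in pairs:
--         counts[key] = counts.get(key, 0) + 1
--     # Stage 2: demultiplex the flat table into the nested per-attribute dicts.
--     result = {}
--     for (att, val), c in counts.items():
--         result.setdefault(att, {})[val] = c
--     return result
-- ===== Notes on version B (the rewrite author's own statement) =====
-- stated objective: alternative
-- what changed: Replaces A's incremental nested dict-of-counters with a two-stage computation: one flat frequency table keyed by the (attribute, value) pair, then a demultiplexing pass that rebuilds the nested dicts from the flat table; no nested dict exists during counting.
import Mathlib
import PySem

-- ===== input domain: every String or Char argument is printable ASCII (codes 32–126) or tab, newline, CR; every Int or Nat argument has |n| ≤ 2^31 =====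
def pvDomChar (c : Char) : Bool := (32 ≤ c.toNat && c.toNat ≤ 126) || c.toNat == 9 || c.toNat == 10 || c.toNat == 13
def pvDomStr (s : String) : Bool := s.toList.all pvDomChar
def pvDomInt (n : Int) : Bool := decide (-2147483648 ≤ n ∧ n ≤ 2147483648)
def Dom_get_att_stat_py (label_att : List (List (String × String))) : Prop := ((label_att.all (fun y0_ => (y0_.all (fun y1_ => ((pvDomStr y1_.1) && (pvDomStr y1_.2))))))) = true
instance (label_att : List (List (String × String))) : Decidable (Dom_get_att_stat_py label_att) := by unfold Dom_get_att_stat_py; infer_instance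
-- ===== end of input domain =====

-- B (alternative): instead of A's incremental nested dict-of-counters, B counts in a
-- FLAT frequency table keyed by the (attribute, value) pair and then demultiplexes
-- that table into the nested per-attribute dicts; same return value, including order.

-- ===== PORT A =====
-- A iterates over each dict 'item'; the dict itself (distinct keys, insertion order,
-- later duplicates overwrite in place) is modelled by PySem.Dict.ofList item.
def get_att_stat_py (label_att : List (List (String × String))) : List (String × List (String × Int)) :=
  let att_analysis : PySem.Dict String (PySem.Dict String Int) :=
    label_att.foldl (fun acc item =>
      (PySem.Dict.ofList item).items.foldl (fun acc p =>
        if acc.contains p.1 then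
          let inner := acc.getD p.1 PySem.Dict.empty
          if inner.contains p.2 then
            acc.insert p.1 (inner.insert p.2 (inner.getD p.2 0 + 1))
          else
            acc.insert p.1 (inner.insert p.2 1)
        else
          acc.insert p.1 (PySem.Dict.ofList [(p.2, 1)])) acc)
      PySem.Dict.empty
  att_analysis.items.map (fun p => (p.1, p.2.items))

-- ===== PORT B =====
-- counts[key] = counts.get(key, 0) + 1  =  d.insert k (d.getD k 0 + 1);
-- result.setdefault(att, {})[val] = c   =  r.modify att empty (·.insert val c).
def get_att_stat_py_alt (label_att : List (List (String × String))) : List (String × List (String × Int)) :=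
  let pairs : List (String × String) :=
    label_att.flatMap (fun item => (PySem.Dict.ofList item).items)
  let counts : PySem.Dict (String × String) Int :=
    pairs.foldl (fun d k => d.insert k (d.getD k 0 + 1)) PySem.Dict.empty
  let result : PySem.Dict String (PySem.Dict String Int) :=
    counts.items.foldl
      (fun r q => r.modify q.1.1 PySem.Dict.empty (fun inner => inner.insert q.1.2 q.2))
      PySem.Dict.empty
  result.items.map (fun p => (p.1, p.2.items))

-- ===== PRECONDITION & SPEC =====
def Spec_get_att_stat_py (label_att : List (List (String × String))) (out : List (String × List (String × Int))) : Prop := out = get_att_stat_py_alt label_att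
instance (label_att : List (List (String × String))) (out : List (String × List (String × Int))) : Decidable (Spec_get_att_stat_py label_att out) := by unfold Spec_get_att_stat_py; infer_instance

-- ===== CLAIM (what is proved, stated in full; the proofs are below) =====
def Claim_equal_get_att_stat_py : Prop := ∀ (label_att : List (List (String × String))), Dom_get_att_stat_py label_att → Spec_get_att_stat_py label_att (get_att_stat_py label_att)

-- ===== LEMMAS AND PROOFS =====

-- 'lift' sends a grouping dict (values per attribute) to A's nested counting dict.
def pvLift (d : PySem.Dict String (List String)) : PySem.Dict String (PySem.Dict String Int) :=
  PySem.Dict.mk (d.items.map (fun p => (p.1, PySem.Dict.counter p.2)))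

theorem pvLift_get? (d : PySem.Dict String (List String)) (a : String) :
    (pvLift d).get? a = (d.get? a).map PySem.Dict.counter := by
  simp [pvLift, PySem.Dict.get?, List.find?_map, Function.comp_def, Option.map_map]

theorem pvLift_contains (d : PySem.Dict String (List String)) (a : String) :
    (pvLift d).contains a = d.contains a := by
  simp [pvLift, PySem.Dict.contains, List.any_map, Function.comp_def]

theorem pvLift_getD (d : PySem.Dict String (List String)) (a : String) :
    (pvLift d).getD a PySem.Dict.empty = PySem.Dict.counter (d.getD a []) := by
  simp only [PySem.Dict.getD, pvLift_get?]
  cases d.get? a <;> rfl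

theorem pvLift_keys (d : PySem.Dict String (List String)) :
    (pvLift d).keys = d.keys := by
  simp [pvLift, PySem.Dict.keys, List.map_map, Function.comp_def]

theorem pvLift_insert (d : PySem.Dict String (List String)) (a : String) (ws : List String) :
    pvLift (d.insert a ws) = (pvLift d).insert a (PySem.Dict.counter ws) := by
  apply PySem.Dict.ext
  show ((d.insert a ws).items.map _) = _
  rw [PySem.Dict.items_insert, PySem.Dict.items_insert, pvLift_contains]
  by_cases h : d.contains a = true
  · simp only [h, if_true, List.map_map, pvLift]
    apply List.map_congr_left
    intro p _
    by_cases hp : p.1 = a <;> simp [hp]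
  · simp [h, pvLift]

-- one step of A's loop on the lifted dict is one step of the grouping loop
theorem pvStep (d : PySem.Dict String (List String)) (p : String × String) :
    (if (pvLift d).contains p.1 then
        let inner := (pvLift d).getD p.1 PySem.Dict.empty
        if inner.contains p.2 then
          (pvLift d).insert p.1 (inner.insert p.2 (inner.getD p.2 0 + 1))
        else
          (pvLift d).insert p.1 (inner.insert p.2 1)
      else
        (pvLift d).insert p.1 (PySem.Dict.ofList [(p.2, 1)]))
      = pvLift (d.modify p.1 [] (· ++ [p.2])) := by
  have hmod : d.modify p.1 [] (· ++ [p.2]) = d.insert p.1 (d.getD p.1 [] ++ [p.2]) := rfl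
  rw [hmod, pvLift_insert, PySem.Dict.counter_append_singleton, pvLift_contains, pvLift_getD]
  by_cases h : d.contains p.1 = true
  · simp only [h, if_true]
    by_cases hv : (PySem.Dict.counter (d.getD p.1 [])).contains p.2 = true
    · simp only [hv, if_true, PySem.Dict.modify, PySem.Dict.getD_counter]
    · simp only [hv, Bool.false_eq_true, if_false, PySem.Dict.modify,
        PySem.Dict.getD_of_not_contains _ _ (Bool.of_not_eq_true hv), zero_add]
  · simp only [h, Bool.false_eq_true, if_false,
      PySem.Dict.getD_of_not_contains _ _ (Bool.of_not_eq_true h)]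
    rfl

-- A's whole loop over a flattened pair list, on the lifted dict, is the grouping loop
theorem pvFold (pairs : List (String × String)) (d : PySem.Dict String (List String)) :
    pairs.foldl (fun acc p =>
        if acc.contains p.1 then
          let inner := acc.getD p.1 PySem.Dict.empty
          if inner.contains p.2 then
            acc.insert p.1 (inner.insert p.2 (inner.getD p.2 0 + 1))
          else
            acc.insert p.1 (inner.insert p.2 1)
        else
          acc.insert p.1 (PySem.Dict.ofList [(p.2, 1)])) (pvLift d)
      = pvLift (pairs.foldl (fun g p => g.modify p.1 [] (· ++ [p.2])) d) := by
  induction pairs generalizing d with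
  | nil => rfl
  | cons p rest ih =>
    simp only [List.foldl_cons]
    rw [pvStep, ih]

-- nested loop over items = one loop over the flattened (att, val) pairs
theorem pvFlat {α β γ : Type} (f : α → List β) (g : γ → β → γ) (l : List α) (init : γ) :
    l.foldl (fun acc x => (f x).foldl g acc) init = (l.flatMap f).foldl g init := by
  induction l generalizing init with
  | nil => rfl
  | cons x xs ih => simp [List.foldl_append, ih]

-- first-occurrence dedup of an appended element
theorem pvOfList_append_singleton {α : Type} [BEq α] [LawfulBEq α] [DecidableEq α] (l : List α) (x : α) :
    PySem.Set.ofList (l ++ [x]) = PySem.Set.ofList l ++ (if x ∈ l then [] else [x]) := by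
  have h1 : PySem.Set.ofList [x] = [x] := rfl
  by_cases h : x ∈ l <;>
    simp [PySem.Set.ofList_append, PySem.Set.update_eq_append_filter,
      PySem.Set.mem_ofList, h, h1]

-- L1: deduping first before mapping does not change the dedup of the image
theorem pvOfList_map_ofList {α β : Type} [BEq α] [LawfulBEq α] [DecidableEq α] [BEq β] [LawfulBEq β] [DecidableEq β] (f : α → β) (l : List α) :
    PySem.Set.ofList ((PySem.Set.ofList l).map f) = PySem.Set.ofList (l.map f) := by
  induction l using List.reverseRecOn with
  | nil => rfl
  | append_singleton l x ih =>
    rw [pvOfList_append_singleton l x]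
    by_cases h : x ∈ l
    · rw [if_pos h, List.append_nil, ih, List.map_append, List.map_cons, List.map_nil,
        pvOfList_append_singleton]
      have hfx : f x ∈ l.map f := List.mem_map_of_mem h
      rw [if_pos hfx, List.append_nil]
    · rw [if_neg h, List.map_append, List.map_cons, List.map_nil, List.map_append,
        List.map_cons, List.map_nil, pvOfList_append_singleton, pvOfList_append_singleton, ih]
      simp [List.mem_map, PySem.Set.mem_ofList]

-- L2: values of attribute a, deduped, = seconds of the deduped pairs with first a
theorem pvOfList_filter_snd (l : List (String × String)) (a : String) :
    PySem.Set.ofList ((l.filter (fun q => q.1 == a)).map (·.2))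
      = ((PySem.Set.ofList l).filter (fun q => q.1 == a)).map (·.2) := by
  induction l using List.reverseRecOn with
  | nil => rfl
  | append_singleton l x ih =>
    rw [pvOfList_append_singleton l x, List.filter_append, List.filter_append,
      List.map_append, List.map_append]
    by_cases hx : x.1 = a
    · have hbx : (x.1 == a) = true := by simp [hx]
      have hmem : x.2 ∈ (l.filter (fun q => q.1 == a)).map (·.2) ↔ x ∈ l := by
        simp only [List.mem_map, List.mem_filter, beq_iff_eq]
        constructor
        · rintro ⟨q, ⟨hq, hqa⟩, hq2⟩
          have : q = x := Prod.ext (hqa.trans hx.symm) hq2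
          exact this ▸ hq
        · intro h; exact ⟨x, ⟨h, hx⟩, rfl⟩
      simp only [List.filter_cons, hbx, if_true, List.filter_nil, List.map_cons, List.map_nil]
      rw [pvOfList_append_singleton, ih]
      by_cases h : x ∈ l <;> simp [h, hmem, hbx]
    · have hb : (x.1 == a) = false := by simp [hx]
      simp only [List.filter_cons, hb, Bool.false_eq_true, if_false, List.filter_nil,
        List.map_nil, List.append_nil, ih]
      by_cases h : x ∈ l <;> simp [h, hb]

-- L3: counting a value among attribute a's values = counting the pair
theorem pvCount_filter_snd (l : List (String × String)) (a v : String) :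
    ((l.filter (fun q => q.1 == a)).map (·.2)).count v = l.count (a, v) := by
  induction l with
  | nil => rfl
  | cons q t ih =>
    by_cases hq : q = (a, v)
    · subst hq; simp [ih]
    · rw [List.count_cons_of_ne hq]
      by_cases ha : q.1 = a
      · have hv : q.2 ≠ v := fun h2 => hq (Prod.ext ha h2)
        simp [ha, hv, ih]
      · simp [ha, ih]

-- L0: getD through a keyed modify-fold = fold of the updates whose key matches
theorem pvGetD_keyed_fold {β γ : Type} (L : List β) (key : β → String) (g : β → γ → γ)
    (d0 : γ) (d : PySem.Dict String γ) (a : String) :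
    (L.foldl (fun d q => d.modify (key q) d0 (g q)) d).getD a d0
      = (L.filter (fun q => key q == a)).foldl (fun x q => g q x) (d.getD a d0) := by
  induction L generalizing d with
  | nil => rfl
  | cons q rest ih =>
    simp only [List.foldl_cons, List.filter_cons, ih, PySem.Dict.getD_modify]
    by_cases h : key q = a
    · simp [h]
    · simp [h, Ne.symm h]

-- the two outer dicts agree at every attribute
theorem pvGetD_agree (flat : List (String × String)) (a : String) :
    (pvLift (flat.foldl (fun g p => g.modify p.1 [] (· ++ [p.2])) PySem.Dict.empty)).getD a PySem.Dict.empty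
      = (((PySem.List.dedup flat).map (fun k => (k, (flat.count k : Int)))).foldl
          (fun r q => r.modify q.1.1 PySem.Dict.empty (fun inner => inner.insert q.1.2 q.2))
          PySem.Dict.empty).getD a PySem.Dict.empty := by
  rw [pvLift_getD, PySem.Dict.getD_foldl_modify_append, pvGetD_keyed_fold, PySem.Dict.getD_empty,
    PySem.Dict.getD_empty, List.filter_map]
  have hcomp : ((fun q => q.1.1 == a) ∘ fun k => (k, (flat.count k : Int)))
      = fun k => k.1 == a := rfl
  rw [hcomp, List.nil_append]
  set D := (PySem.List.dedup flat).filter (fun k => k.1 == a) with hD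
  have hDof : D = (PySem.Set.ofList flat).filter (fun q => q.1 == a) := by
    simp [hD, PySem.List.dedup_eq_ofList]
  have hvals : PySem.Set.ofList ((flat.filter (fun q => q.1 == a)).map (·.2))
      = D.map (·.2) := by rw [hDof]; exact pvOfList_filter_snd flat a
  apply PySem.Dict.ext
  rw [PySem.Dict.items_counter]
  rw [PySem.Dict.items_foldl_insert_fresh (D.map fun k => (k, (flat.count k : Int)))
        (fun q => q.1.2) (fun q => q.2) PySem.Dict.empty
        (fun _ _ => PySem.Dict.contains_empty _)
        (by rw [List.map_map]
            have : ((fun q => q.1.2) ∘ fun k => (k, (flat.count k : Int))) = fun k : String × String => k.2 := rfl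
            rw [this, ← hvals]
            exact PySem.Set.nodup_ofList _)]
  rw [show (PySem.Dict.empty : PySem.Dict String Int).items = [] from rfl, List.nil_append,
    hvals, List.map_map, List.map_map]
  apply List.map_congr_left
  intro k hk
  have hka : k.1 = a := by
    have := (List.mem_filter.mp hk).2
    simpa using this
  simp only [Function.comp_apply]
  congr 1
  rw [pvCount_filter_snd flat a k.2, ← hka]

-- ===== VERDICT (by name: the statement is the Claim_ definition above) =====
theorem get_att_stat_py_spec : Claim_equal_get_att_stat_py := by
  intro label_att _
  show get_att_stat_py label_att = get_att_stat_py_alt label_att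
  simp only [get_att_stat_py, get_att_stat_py_alt]
  set flat := label_att.flatMap (fun item => (PySem.Dict.ofList item).items) with hflat
  set grp := flat.foldl (fun g p => g.modify p.1 [] (· ++ [p.2])) PySem.Dict.empty with hgrp
  have hA : label_att.foldl (fun acc item =>
      (PySem.Dict.ofList item).items.foldl (fun acc p =>
        if acc.contains p.1 then
          let inner := acc.getD p.1 PySem.Dict.empty
          if inner.contains p.2 then
            acc.insert p.1 (inner.insert p.2 (inner.getD p.2 0 + 1))
          else
            acc.insert p.1 (inner.insert p.2 1)
        else
          acc.insert p.1 (PySem.Dict.ofList [(p.2, 1)])) acc)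
      PySem.Dict.empty = pvLift grp := by
    rw [pvFlat, ← hflat, hgrp]
    exact pvFold flat PySem.Dict.empty
  have hB : flat.foldl (fun d k => d.insert k (d.getD k 0 + 1)) PySem.Dict.empty
      = PySem.Dict.counter flat := PySem.Dict.foldl_insert_getD_add_one_eq_counter flat
  rw [hA, hB, PySem.Dict.items_counter]
  set res := (((PySem.Set.ofList flat).map (fun k => (k, (flat.count k : Int)))).foldl
      (fun r q => r.modify q.1.1 PySem.Dict.empty (fun inner => inner.insert q.1.2 q.2))
      PySem.Dict.empty) with hres
  have hKA : (pvLift grp).keys = PySem.Set.ofList (flat.map (·.1)) := by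
    rw [pvLift_keys, hgrp, PySem.Dict.keys_foldl_modify_key flat (fun p => p.1) [] (fun _ p => (· ++ [p.2])),
      PySem.Dict.keys_empty, PySem.Set.update_nil_left]
  have hKB : res.keys = PySem.Set.ofList (flat.map (·.1)) := by
    rw [hres, PySem.Dict.keys_foldl_modify_key
        ((PySem.Set.ofList flat).map (fun k => (k, (flat.count k : Int))))
        (fun q : (String × String) × Int => q.1.1) PySem.Dict.empty
        (fun _ q => (fun inner => inner.insert q.1.2 q.2)),
      PySem.Dict.keys_empty, PySem.Set.update_nil_left, List.map_map]
    have hc : ((fun q : (String × String) × Int => q.1.1) ∘ fun k => (k, (flat.count k : Int)))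
        = fun k : String × String => k.1 := rfl
    rw [hc]
    exact pvOfList_map_ofList (fun k : String × String => k.1) flat
  have hNA : (pvLift grp).keys.Nodup := by rw [hKA]; exact PySem.Set.nodup_ofList _
  have hNB : res.keys.Nodup := by rw [hKB]; exact PySem.Set.nodup_ofList _
  have hitems : (pvLift grp).items = res.items := by
    rw [PySem.Dict.items_eq_map_keys _ hNA PySem.Dict.empty,
      PySem.Dict.items_eq_map_keys _ hNB PySem.Dict.empty, hKA, hKB]
    apply List.map_congr_left
    intro a _
    have h := pvGetD_agree flat a
    simp only [PySem.List.dedup_eq_ofList] at h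
    rw [← hgrp, ← hres] at h
    rw [h]
  rw [hitems]
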